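-- pv_equiv track=rewrite | github.com/Junghoo-developer/Anima | Core/pipeline/delivery_packets.py | _fact_delivery_brief
-- ===== SOURCE A (Python) =====
-- def _dedupe_keep_order(items):
--     seen = set()
--     result = []
--     for item in items:
--         normalized = str(item or "").strip()
--         if not normalized or normalized in seen:
--             continue
--         seen.add(normalized)
--         result.append(normalized)
--     return result
--
-- def _fact_delivery_brief(facts: list[dict]) -> str:
--     snippets = []
--     for fact in facts[:3]:
--         if not isinstance(fact, dict):
--             continue
--         text = str(fact.get("extracted_fact") or fact.get("excerpt") or "").strip()
--         if not text:
--             continue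
--         snippets.append(text)
--     snippets = _dedupe_keep_order(snippets)
--     if not snippets:
--         return ""
--     if len(snippets) == 1:
--         return f"Use this grounded fact: {snippets[0]}"
--     return "Use these grounded facts: " + " / ".join(snippets)
-- ===== SOURCE B (Python) =====
-- def _fact_delivery_brief(facts: list[dict]) -> str:
--     texts = [str(f.get("extracted_fact") or f.get("excerpt") or "").strip()
--              for f in facts[:3] if isinstance(f, dict)]
--
--     def dedup(rest):
--         # keep-first dedup by recursion: dedup the tail, then remove later copies of the head
--         if not rest:
--             return []
--         head, deduped = rest[0], dedup(rest[1:])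
--         if not head:
--             return deduped
--         return [head] + [t for t in deduped if t != head]
--
--     snippets = dedup(texts)
--     if not snippets:
--         return ""
--     label = "Use this grounded fact: " if len(snippets) == 1 else "Use these grounded facts: "
--     return label + " / ".join(snippets)
-- ===== Notes on version B (the rewrite author's own statement) =====
-- stated objective: alternative
-- what changed: A's imperative collect loop plus seen-set dedup fold is replaced by a comprehension for extraction and a recursive keep-first dedup that dedups the tail and then filters later copies of the head out of it (no set, no accumulator), with a two-way label instead of A's three-branch return.
import Mathlib
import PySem

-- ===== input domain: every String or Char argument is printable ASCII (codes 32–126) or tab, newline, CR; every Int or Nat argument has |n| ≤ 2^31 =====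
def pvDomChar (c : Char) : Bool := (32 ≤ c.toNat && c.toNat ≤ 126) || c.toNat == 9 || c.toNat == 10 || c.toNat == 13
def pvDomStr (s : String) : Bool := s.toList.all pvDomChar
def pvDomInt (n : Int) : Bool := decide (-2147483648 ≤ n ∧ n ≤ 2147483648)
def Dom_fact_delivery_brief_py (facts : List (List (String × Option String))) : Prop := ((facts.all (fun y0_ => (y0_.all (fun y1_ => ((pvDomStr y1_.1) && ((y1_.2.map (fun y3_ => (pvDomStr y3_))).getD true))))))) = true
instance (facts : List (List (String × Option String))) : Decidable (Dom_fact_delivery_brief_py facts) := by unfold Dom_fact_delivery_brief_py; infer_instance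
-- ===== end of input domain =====

-- B replaces A's seen-set dedup loop by a comprehension plus a recursive keep-first dedup
-- (dedup the tail, then remove later copies of the head); return values proved equal.

-- ===== PORT A =====
-- Python `x or y` for x a dict value (absent key / None / str): truthy iff a nonempty string
def pvOrStr (v : Option (Option String)) (d : String) : String :=
  match v with
  | some (some s) => if s = "" then d else s
  | _ => d

-- shared by both Pythons: str(fact.get("extracted_fact") or fact.get("excerpt") or "").strip()
def pvFdbText (fact : List (String × Option String)) : String :=
  PySem.Str.strip (pvOrStr (PySem.Dict.get? (PySem.Dict.mk fact) "extracted_fact")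
    (pvOrStr (PySem.Dict.get? (PySem.Dict.mk fact) "excerpt") ""))

def dedupe_keep_order (items : List String) : List String :=
  (items.foldl
    (fun (st : PySem.Set String × List String) item =>
      let normalized := PySem.Str.strip (if item = "" then "" else item)
      if normalized = "" || PySem.Set.contains st.1 normalized then st
      else (PySem.Set.add st.1 normalized, st.2 ++ [normalized]))
    (PySem.Set.empty, [])).2

def fact_delivery_brief_py (facts : List (List (String × Option String))) : String :=
  let snippets :=
    (PySem.List.slice facts none (some 3)).foldl
      (fun acc fact =>
        -- `isinstance(fact, dict)` holds for every value of this type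
        let text := pvFdbText fact
        if text = "" then acc else acc ++ [text]) []
  let snippets := dedupe_keep_order snippets
  if snippets = [] then ""
  else if snippets.length = 1 then "Use this grounded fact: " ++ snippets[0]!
  else "Use these grounded facts: " ++ PySem.Str.join " / " snippets

-- ===== PORT B =====
-- Source B's inner `dedup`: recurse on the tail, drop an empty head, else keep the head and
-- filter its later copies out of the deduped tail
def pvDedupRec : List String → List String
  | [] => []
  | t :: r =>
    let deduped := pvDedupRec r
    if t = "" then deduped else t :: deduped.filter (fun x => x != t)

def fact_delivery_brief_py_alt (facts : List (List (String × Option String))) : String :=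
  let texts := (PySem.List.slice facts none (some 3)).map pvFdbText
  let snippets := pvDedupRec texts
  if snippets = [] then ""
  else
    (if snippets.length = 1 then "Use this grounded fact: " else "Use these grounded facts: ")
      ++ PySem.Str.join " / " snippets

-- ===== PRECONDITION & SPEC =====
def Spec_fact_delivery_brief_py (facts : List (List (String × Option String))) (out : String) : Prop := out = fact_delivery_brief_py_alt facts
instance (facts : List (List (String × Option String))) (out : String) : Decidable (Spec_fact_delivery_brief_py facts out) := by unfold Spec_fact_delivery_brief_py; infer_instance

-- ===== CLAIM (what is proved, stated in full; the proofs are below) =====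
def Claim_equal_fact_delivery_brief_py : Prop := ∀ (facts : List (List (String × Option String))), Dom_fact_delivery_brief_py facts → Spec_fact_delivery_brief_py facts (fact_delivery_brief_py facts)

-- ===== LEMMAS AND PROOFS =====

theorem pvDropWhile_idem {α : Type} (p : α → Bool) (l : List α) :
    (l.dropWhile p).dropWhile p = l.dropWhile p := by
  induction l with
  | nil => rfl
  | cons a t ih => by_cases h : p a <;> simp [h, ih]

theorem pvLstrip_rstrip (t : List Char) (ht : PySem.Chars.lstrip t = t) :
    PySem.Chars.lstrip (PySem.Chars.rstrip t) = PySem.Chars.rstrip t := by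
  unfold PySem.Chars.lstrip PySem.Chars.rstrip at *
  rw [List.dropWhile_eq_self_iff]
  intro hl
  obtain ⟨u, hu⟩ := List.dropWhile_suffix (l := t.reverse) PySem.Chars.isspace
  have hpref : (List.dropWhile PySem.Chars.isspace t.reverse).reverse ++ u.reverse = t := by
    rw [← List.reverse_append, hu, List.reverse_reverse]
  have ht0 : 0 < t.length := by
    rcases t with _ | _
    · simp at hl
    · simp
  have hhead : t[0]'ht0 = (List.dropWhile PySem.Chars.isspace t.reverse).reverse[0]'hl := by
    rw [List.getElem_of_eq hpref.symm]
    exact List.getElem_append_left hl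
  rw [← hhead]
  exact (List.dropWhile_eq_self_iff.mp ht) ht0

theorem pvCharsStrip_idem (s : List Char) :
    PySem.Chars.strip (PySem.Chars.strip s) = PySem.Chars.strip s := by
  unfold PySem.Chars.strip
  rw [pvLstrip_rstrip (PySem.Chars.lstrip s)
    (by unfold PySem.Chars.lstrip; exact pvDropWhile_idem _ _)]
  unfold PySem.Chars.rstrip
  rw [List.reverse_reverse, pvDropWhile_idem]

theorem pvStrip_idem (s : String) :
    PySem.Str.strip (PySem.Str.strip s) = PySem.Str.strip s := by
  rw [← String.toList_inj]
  simp [PySem.Str.toList_strip, pvCharsStrip_idem]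

-- A's first loop collects exactly the nonempty texts, in order
theorem pvCollect_eq (l : List (List (String × Option String))) (acc : List String) :
    l.foldl (fun acc fact =>
        let text := pvFdbText fact
        if text = "" then acc else acc ++ [text]) acc
      = acc ++ (l.map pvFdbText).filter (fun t => !(t == "")) := by
  induction l generalizing acc with
  | nil => simp
  | cons f r ih => by_cases h : pvFdbText f = "" <;> simp [h, ih]

-- A's seen-set fold, over already-stripped items, equals B's recursive dedup restricted to
-- elements not already collected
theorem pvSetFold_eq (items : List String) (st : PySem.Set String × List String)
    (hs : ∀ t ∈ items, PySem.Str.strip t = t)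
    (hinv : ∀ x, x ∈ st.1 ↔ x ∈ st.2) :
    (items.foldl
      (fun (st : PySem.Set String × List String) item =>
        let normalized := PySem.Str.strip (if item = "" then "" else item)
        if normalized = "" || PySem.Set.contains st.1 normalized then st
        else (PySem.Set.add st.1 normalized, st.2 ++ [normalized])) st).2
      = st.2 ++ (pvDedupRec items).filter (fun x => !(decide (x ∈ st.2))) := by
  induction items generalizing st with
  | nil => simp [pvDedupRec]
  | cons t r ih =>
    have hnorm : PySem.Str.strip (if t = "" then "" else t) = t := by
      by_cases h : t = ""
      · simp [h]; rfl
      · simp [h, hs t (by simp)]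
    have hr : ∀ x ∈ r, PySem.Str.strip x = x := fun x hx => hs x (by simp [hx])
    have hct : PySem.Set.contains st.1 t = decide (t ∈ st.2) := by
      simp [PySem.Set.contains, hinv t]
    simp only [List.foldl_cons, hnorm, hct]
    by_cases he : t = ""
    · rw [if_pos (by simp [he]), ih st hr hinv]
      simp [pvDedupRec, he]
    · by_cases hm : t ∈ st.2
      · rw [if_pos (by simp [hm]), ih st hr hinv]
        have hfc : List.filter (fun x => !decide (x ∈ st.2)) (pvDedupRec (t :: r))
            = List.filter (fun x => !decide (x ∈ st.2)) (pvDedupRec r) := by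
          simp only [pvDedupRec, if_neg he, List.filter_cons, List.filter_filter]
          rw [show (!decide (t ∈ st.2)) = false by simp [hm]]
          simp only [Bool.false_eq_true, if_false]
          exact List.filter_congr (fun x _ => by
            by_cases hx : x ∈ st.2 <;> by_cases hxt : x = t <;> simp_all)
        rw [hfc]
      · have hts1 : t ∉ st.1 := fun h => hm ((hinv t).mp h)
        have hinv' : ∀ x, x ∈ PySem.Set.add st.1 t ↔ x ∈ st.2 ++ [t] := by
          intro x
          simp only [PySem.Set.add, PySem.Set.contains]
          rw [if_neg (by simp [hts1])]
          simp [List.mem_append, hinv x]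
        rw [if_neg (by simp [he, hm]), ih _ hr hinv']
        have hfc : List.filter (fun x => !decide (x ∈ st.2)) (pvDedupRec (t :: r))
            = t :: List.filter (fun x => !decide (x ∈ st.2 ++ [t])) (pvDedupRec r) := by
          simp only [pvDedupRec, if_neg he, List.filter_cons, List.filter_filter]
          rw [show (!decide (t ∈ st.2)) = true by simp [hm]]
          simp only [if_true]
          exact congrArg (t :: ·) (List.filter_congr (fun x _ => by
            by_cases hx : x ∈ st.2 <;> by_cases hxt : x = t <;>
              simp_all [List.mem_append])).symm
        rw [hfc]
        simp

-- pre-filtering the empties away does not change B's recursive dedup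
theorem pvDedupRec_filter_ne (ts : List String) :
    pvDedupRec (ts.filter (fun t => !(t == ""))) = pvDedupRec ts := by
  induction ts with
  | nil => rfl
  | cons t r ih =>
    by_cases h : t = ""
    · simp [h, ih, pvDedupRec]
    · simp [h, pvDedupRec, ih]

theorem fact_delivery_brief_py_eq (facts : List (List (String × Option String))) :
    fact_delivery_brief_py facts = fact_delivery_brief_py_alt facts := by
  have htexts : ∀ t ∈ ((PySem.List.slice facts none (some 3)).map pvFdbText).filter
      (fun t => !(t == "")), PySem.Str.strip t = t := by
    intro t ht
    obtain ⟨f, _, rfl⟩ := List.mem_map.mp (List.mem_of_mem_filter ht)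
    exact pvStrip_idem _
  have hsn : dedupe_keep_order
      ((PySem.List.slice facts none (some 3)).foldl
        (fun acc fact =>
          let text := pvFdbText fact
          if text = "" then acc else acc ++ [text]) [])
      = pvDedupRec ((PySem.List.slice facts none (some 3)).map pvFdbText) := by
    rw [pvCollect_eq]
    unfold dedupe_keep_order
    rw [List.nil_append, pvSetFold_eq _ _ htexts (by intro x; simp [PySem.Set.empty])]
    simp [pvDedupRec_filter_ne]
  simp only [fact_delivery_brief_py, fact_delivery_brief_py_alt]
  rw [hsn]
  rcases h : pvDedupRec ((PySem.List.slice facts none (some 3)).map pvFdbText) with _ | ⟨x, _ | ⟨y, r⟩⟩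
  · rfl
  · simp [PySem.Str.join, PySem.Chars.join, List.intercalate]
  · simp

-- ===== VERDICT (by name: the statement is the Claim_ definition above) =====
theorem fact_delivery_brief_py_spec : Claim_equal_fact_delivery_brief_py := by
  intro facts _
  exact fact_delivery_brief_py_eq facts
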